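-- pv_equiv track=rewrite | github.com/dolica/mdscrapy | utils/classify.py | fmm
-- ===== SOURCE A (Python) =====
-- def fmm(text:str,dicts):
--     maxlen = len(text) if (len(text)<12) else 12
--     keywords = list()
--
--     while len(text)>0:
--         s1 = text[0:maxlen]
--
--         while(s1 not in dicts):
--             if len(s1) == 1:
--                 break
--             s1 = s1[0:-1]
--
--         if len(s1) >1:
--             keywords.append(s1)
--         text = text[len(s1):]
--     return keywords
-- ===== SOURCE B (Python) =====
-- def fmm(text, dicts):
--     # Index-based scan with a precomputed hash set: at each position take the
--     # longest matching prefix (up to 12 chars) by an ascending length scan.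
--     words = set(dicts)
--     n = len(text)
--     maxlen = n if n < 12 else 12
--     keywords = []
--     i = 0
--     while i < n:
--         limit = min(maxlen, n - i)
--         best = 1
--         for L in range(2, limit + 1):
--             if text[i:i+L] in words:
--                 best = L
--         if best > 1:
--             keywords.append(text[i:i+best])
--         i += best
--     return keywords
-- ===== Notes on version B (the rewrite author's own statement) =====
-- stated objective: faster
-- what changed: A repeatedly reslices and copies the shrinking remainder of the text and re-derives each candidate by substring truncation; B never copies the text: it walks it by index with a precomputed hash set of the dictionary words and finds the longest match (up to 12 chars) by an ascending length scan.
import Mathlib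
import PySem

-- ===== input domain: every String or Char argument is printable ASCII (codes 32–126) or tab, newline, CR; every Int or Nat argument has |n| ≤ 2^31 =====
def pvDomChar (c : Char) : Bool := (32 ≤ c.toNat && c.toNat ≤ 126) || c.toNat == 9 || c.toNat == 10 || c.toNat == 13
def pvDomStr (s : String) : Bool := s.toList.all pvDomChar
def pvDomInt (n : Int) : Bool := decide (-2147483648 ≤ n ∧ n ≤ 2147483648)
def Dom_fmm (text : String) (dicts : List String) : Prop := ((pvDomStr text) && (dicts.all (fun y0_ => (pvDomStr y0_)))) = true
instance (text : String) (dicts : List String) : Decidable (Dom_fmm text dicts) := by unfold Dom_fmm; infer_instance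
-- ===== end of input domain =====

-- B replaces A's substring-shrinking scan over a reshrinking copy of the text by an
-- index-based walk with a precomputed hash set and an ascending longest-match scan.

-- ===== PORT A =====
-- inner `while s1 not in dicts: if len(s1)==1: break; s1 = s1[0:-1]`
-- (the `≤ 1` guard only also stops on s1 = "", where the Python loop is never
--  entered with s1 = "" — text is nonempty inside the outer loop, so maxlen ≥ 1)
def fmmInnerA (s1 : List Char) (ds : List (List Char)) : List Char :=
  if s1 ∈ ds then s1
  else if s1.length ≤ 1 then s1
  else fmmInnerA s1.dropLast ds
termination_by s1.length
decreasing_by simp only [List.length_dropLast]; omega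

-- outer `while len(text)>0`, fuel = initial length (each pass consumes ≥ 1 char)
def fmmLoopA (fuel : Nat) (text : List Char) (maxlen : Nat) (ds : List (List Char))
    (acc : List String) : List String :=
  match fuel with
  | 0 => acc
  | fuel + 1 =>
    if 0 < text.length then
      let s1 := fmmInnerA (text.take maxlen) ds
      fmmLoopA fuel (text.drop s1.length) maxlen ds
        (if 1 < s1.length then acc ++ [String.ofList s1] else acc)
    else acc

def fmm (text : String) (dicts : List String) : List String :=
  let t := text.toList
  let maxlen := if t.length < 12 then t.length else 12
  fmmLoopA t.length t maxlen (dicts.map String.toList) []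

-- ===== PORT B =====
-- `while i < n`, fuel = n (each pass advances i by best ≥ 1)
def fmmLoopB (fuel : Nat) (t : List Char) (n maxlen : Nat) (words : PySem.Set (List Char))
    (i : Nat) (acc : List String) : List String :=
  match fuel with
  | 0 => acc
  | fuel + 1 =>
    if i < n then
      let limit := min maxlen (n - i)
      let best := (PySem.List.pyRange 2 ((limit : Int) + 1) 1).foldl
        (fun best L => if (t.drop i).take L.toNat ∈ words then L.toNat else best) 1
      fmmLoopB fuel t n maxlen words (i + best)
        (if 1 < best then acc ++ [String.ofList ((t.drop i).take best)] else acc)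
    else acc

def fmm_alt (text : String) (dicts : List String) : List String :=
  let t := text.toList
  let words := PySem.Set.ofList (dicts.map String.toList)
  let n := t.length
  let maxlen := if n < 12 then n else 12
  fmmLoopB n t n maxlen words 0 []

-- ===== PRECONDITION & SPEC =====
def Spec_fmm (text : String) (dicts : List String) (out : List String) : Prop := out = fmm_alt text dicts
instance (text : String) (dicts : List String) (out : List String) : Decidable (Spec_fmm text dicts out) := by unfold Spec_fmm; infer_instance

-- ===== CLAIM (what is proved, stated in full; the proofs are below) =====
def Claim_equal_fmm : Prop := ∀ (text : String) (dicts : List String), Dom_fmm text dicts → Spec_fmm text dicts (fmm text dicts)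

-- ===== LEMMAS AND PROOFS =====

-- the longest k ∈ [1..m] with rem.take k ∈ ds when such k ≥ 2 exists, else 1
def descBest (rem : List Char) (ds : List (List Char)) : Nat → Nat
  | 0 => 1
  | m + 1 => if rem.take (m + 1) ∈ ds then m + 1 else descBest rem ds m

theorem descBest_le (rem : List Char) (ds : List (List Char)) (m : Nat) (hm : 1 ≤ m) :
    descBest rem ds m ≤ m := by
  induction m with
  | zero => omega
  | succ m ih =>
    simp only [descBest]; split
    · omega
    · rcases Nat.eq_zero_or_pos m with h | h
      · subst h; simp [descBest]
      · exact Nat.le_succ_of_le (ih h)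

theorem innerA_eq_descBest (rem : List Char) (ds : List (List Char)) (m : Nat)
    (h1 : 1 ≤ m) (h2 : m ≤ rem.length) :
    fmmInnerA (rem.take m) ds = rem.take (descBest rem ds m) := by
  induction m with
  | zero => omega
  | succ m ih =>
    rw [fmmInnerA]
    by_cases hmem : rem.take (m + 1) ∈ ds
    · simp [hmem, descBest]
    · rcases Nat.eq_zero_or_pos m with h | h
      · subst h
        simp [hmem, descBest, List.length_take]
      · have hlen : (rem.take (m + 1)).length = m + 1 := by
          simp [List.length_take]; omega
        have hdrop : (rem.take (m + 1)).dropLast = rem.take m := by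
          rw [List.dropLast_eq_take, hlen]
          simp [List.take_take]
        simp only [hmem, if_false, hlen]
        rw [if_neg (by omega), hdrop, ih h (by omega)]
        simp [descBest, hmem]

theorem foldB_eq_descBest (rem : List Char) (ds : List (List Char)) (m : Nat) :
    (PySem.List.pyRange 2 ((m : Int) + 1) 1).foldl
      (fun best L => if rem.take L.toNat ∈ ds then L.toNat else best) 1
      = descBest rem ds m := by
  induction m with
  | zero =>
    rw [PySem.List.pyRange_one_eq_nil (by norm_num)]
    simp [descBest]
  | succ m ih =>
    rcases Nat.eq_zero_or_pos m with h | h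
    · subst h
      rw [show (((1 : Nat) : Int) + 1) = 2 by norm_num,
        PySem.List.pyRange_one_eq_nil (by norm_num)]
      simp [descBest]
    · have hsplit : PySem.List.pyRange 2 (((m + 1 : Nat) : Int) + 1) 1
          = PySem.List.pyRange 2 ((m : Int) + 1) 1 ++ [(m : Int) + 1] := by
        have h2 : ((m + 1 : Nat) : Int) + 1 = ((m : Int) + 1) + 1 := by push_cast; ring
        rw [h2]
        exact PySem.List.pyRange_one_succ_right (a := 2) (b := (m : Int) + 1)
          (by exact_mod_cast Nat.succ_le_succ h)
      rw [hsplit, List.foldl_append, ih]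
      have htn : ((m : Int) + 1).toNat = m + 1 := by omega
      simp [descBest, htn]

theorem loopA_eq_loopB (fuel : Nat) (t : List Char) (ds : List (List Char))
    (maxlen : Nat) (hml : maxlen = if t.length < 12 then t.length else 12) :
    ∀ (i : Nat) (acc : List String),
      fmmLoopA fuel (t.drop i) maxlen ds acc
        = fmmLoopB fuel t t.length maxlen (PySem.Set.ofList ds) i acc := by
  induction fuel with
  | zero => intro i acc; rfl
  | succ fuel ih =>
    intro i acc
    rw [fmmLoopA, fmmLoopB]
    by_cases hi : i < t.length
    · have hrem : (t.drop i).length = t.length - i := List.length_drop ..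
      have hlim1 : 1 ≤ min maxlen (t.length - i) := by
        subst hml; split <;> omega
      have hlim2 : min maxlen (t.length - i) ≤ (t.drop i).length := by
        rw [hrem]; omega
      -- A's s1 is the best prefix
      have htake : (t.drop i).take maxlen = (t.drop i).take (min maxlen (t.length - i)) := by
        rcases Nat.le_total maxlen (t.length - i) with h | h
        · rw [Nat.min_eq_left h]
        · rw [Nat.min_eq_right h, ← hrem, List.take_length,
            List.take_of_length_le (by omega)]
      set b := descBest (t.drop i) ds (min maxlen (t.length - i)) with hb
      have hs1 : fmmInnerA ((t.drop i).take maxlen) ds = (t.drop i).take b := by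
        rw [htake]; exact innerA_eq_descBest _ _ _ hlim1 hlim2
      have hble : b ≤ (t.drop i).length :=
        le_trans (descBest_le _ _ _ hlim1) hlim2
      have hs1len : ((t.drop i).take b).length = b := by
        simp [List.length_take]; omega
      -- B's best is the same number
      have hbest : (PySem.List.pyRange 2 (((min maxlen (t.length - i) : Nat) : Int) + 1) 1).foldl
          (fun best L => if (t.drop i).take L.toNat ∈ PySem.Set.ofList ds then L.toNat else best) 1 = b := by
        rw [show (fun (best : Nat) (L : Int) =>
              if (t.drop i).take L.toNat ∈ PySem.Set.ofList ds then L.toNat else best)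
            = (fun (best : Nat) (L : Int) =>
              if (t.drop i).take L.toNat ∈ ds then L.toNat else best) from by
          funext best L
          simp [PySem.Set.mem_ofList]]
        exact foldB_eq_descBest _ _ _
      rw [if_pos (by rw [hrem]; omega), if_pos hi]
      simp only [hs1, hs1len, hbest, List.drop_drop]
      exact ih (i + b) _
    · rw [if_neg (by rw [List.length_drop]; omega), if_neg hi]

-- ===== VERDICT (by name: the statement is the Claim_ definition above) =====
theorem fmm_spec : Claim_equal_fmm := by
  intro text dicts _
  show fmm text dicts = fmm_alt text dicts
  unfold fmm fmm_alt
  have := loopA_eq_loopB text.toList.length text.toList (dicts.map String.toList)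
    (if text.toList.length < 12 then text.toList.length else 12) rfl 0 []
  simpa using this
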